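-- pv_equiv track=rewrite | github.com/vfskrum19/college-bball-metrics | generators/generate_bracket.py | assign_regions
-- ===== SOURCE A (Python) =====
-- from typing import List, Dict, Tuple
--
-- def assign_regions(s_curve_teams: List[Dict]) -> Dict[str, List[Dict]]:
--     """
--     Distribute teams into 4 regions following NCAA bracketing principles
--     """
--     regions = {
--         'East': [],
--         'West': [],
--         'South': [],
--         'Midwest': []
--     }
--
--     region_names = list(regions.keys())
--
--     # Distribute teams by seed line
--     for seed_line in range(1, 17):
--         # Get all teams on this seed line (should be 4 teams)
--         seed_teams = [t for t in s_curve_teams if t['seed_line'] == seed_line]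
--
--         # For #1 seeds, assign to regions based on S-curve order
--         # For other seeds, distribute to balance regions
--         for idx, team in enumerate(seed_teams):
--             if seed_line == 1:
--                 # #1 seeds go in order: East(1), West(2), South(3), Midwest(4)
--                 regions[region_names[idx]].append(team)
--             else:
--                 # Balance distribution across regions
--                 # Serpentine pattern to balance strength
--                 region_idx = idx % 4
--                 regions[region_names[region_idx]].append(team)
--
--     return regions
-- ===== SOURCE B (Python) =====
-- def assign_regions(s_curve_teams):
--     """
--     Distribute teams into 4 regions following NCAA bracketing principles.
--     One grouping pass instead of 16 scans over the team list.
--     """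
--     region_names = ['East', 'West', 'South', 'Midwest']
--     groups = {}
--     for team in s_curve_teams:
--         groups.setdefault(team['seed_line'], []).append(team)
--     regions = {name: [] for name in region_names}
--     for seed_line in range(1, 17):
--         for idx, team in enumerate(groups.get(seed_line, [])):
--             regions[region_names[idx % 4]].append(team)
--     return regions
-- ===== Notes on version B (the rewrite author's own statement) =====
-- stated objective: faster
-- what changed: B groups teams by seed line in one dictionary-building pass and then walks seed lines 1..16 over the prebuilt groups with a uniform idx % 4 region rule, instead of A's 16 full filtering scans of the team list and a special-cased seed-1 branch.
import Mathlib
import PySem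

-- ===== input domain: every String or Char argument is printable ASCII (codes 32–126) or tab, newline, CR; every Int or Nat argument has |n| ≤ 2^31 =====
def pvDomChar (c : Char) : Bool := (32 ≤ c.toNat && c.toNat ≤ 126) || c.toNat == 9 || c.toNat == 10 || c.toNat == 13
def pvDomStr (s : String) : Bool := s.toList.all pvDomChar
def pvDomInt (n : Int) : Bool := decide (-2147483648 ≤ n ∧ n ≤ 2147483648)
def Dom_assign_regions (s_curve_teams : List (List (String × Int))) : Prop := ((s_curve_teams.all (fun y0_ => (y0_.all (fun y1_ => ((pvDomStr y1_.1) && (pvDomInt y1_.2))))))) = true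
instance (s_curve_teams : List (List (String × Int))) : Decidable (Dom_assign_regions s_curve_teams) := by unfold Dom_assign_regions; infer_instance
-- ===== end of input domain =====

-- One honest line: B builds one dict grouping teams by seed line and assigns every seed
-- line with the uniform idx % 4 rule, instead of A's 16 filtering scans with a seed-1 branch.

-- t['seed_line'] (teams are Python dicts; duplicate keys: last value wins, as dict())
def pvSeed (t : List (String × Int)) : Int := (PySem.Dict.ofList t).getD "seed_line" 0

-- ===== PORT A =====
def assign_regions (s_curve_teams : List (List (String × Int))) : List (String × List (List (String × Int))) :=
  let regions : PySem.Dict String (List (List (String × Int))) :=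
    PySem.Dict.ofList [("East", []), ("West", []), ("South", []), ("Midwest", [])]
  let region_names := regions.keys
  let final := (PySem.List.pyRange 1 17 1).foldl (fun regions seed_line =>
    let seed_teams := s_curve_teams.filter (fun t => pvSeed t == seed_line)
    (PySem.List.enumerate seed_teams 0).foldl (fun regions p =>
      if seed_line == 1 then
        regions.modify (PySem.List.pyGetD region_names p.1 "") [] (· ++ [p.2])
      else
        regions.modify (PySem.List.pyGetD region_names (PySem.Int.mod p.1 4) "") [] (· ++ [p.2]))
      regions) regions
  final.items

-- ===== PORT B =====
def assign_regions_alt (s_curve_teams : List (List (String × Int))) : List (String × List (List (String × Int))) :=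
  let region_names := ["East", "West", "South", "Midwest"]
  let groups : PySem.Dict Int (List (List (String × Int))) :=
    s_curve_teams.foldl (fun d t => d.modify (pvSeed t) [] (· ++ [t])) PySem.Dict.empty
  let regions0 : PySem.Dict String (List (List (String × Int))) :=
    region_names.foldl (fun d n => d.insert n []) PySem.Dict.empty
  let final := (PySem.List.pyRange 1 17 1).foldl (fun regions seed_line =>
    (PySem.List.enumerate (groups.getD seed_line []) 0).foldl (fun regions p =>
      regions.modify (PySem.List.pyGetD region_names (PySem.Int.mod p.1 4) "") [] (· ++ [p.2]))
      regions) regions0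
  final.items

-- ===== PRECONDITION & SPEC =====
-- Pre_ excludes exactly the inputs where A raises: a team without a 'seed_line' key
-- (KeyError) or five or more teams on seed line 1 (IndexError in region_names[idx]).
def Pre_assign_regions (s_curve_teams : List (List (String × Int))) : Prop :=
  (∀ t ∈ s_curve_teams, (PySem.Dict.ofList t).contains "seed_line" = true) ∧
  (s_curve_teams.filter (fun t => pvSeed t == 1)).length ≤ 4
instance (s_curve_teams : List (List (String × Int))) : Decidable (Pre_assign_regions s_curve_teams) := by unfold Pre_assign_regions; infer_instance

def pvWitness_assign_regions : (List (List (String × Int))) :=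
  [[("seed_line", 1)], [("seed_line", 1), ("rank", 7)], [("seed_line", 2)], [("seed_line", 3)]]

def Spec_assign_regions (s_curve_teams : List (List (String × Int))) (out : List (String × List (List (String × Int)))) : Prop := out = assign_regions_alt s_curve_teams
instance (s_curve_teams : List (List (String × Int))) (out : List (String × List (List (String × Int)))) : Decidable (Spec_assign_regions s_curve_teams out) := by unfold Spec_assign_regions; infer_instance

-- ===== CLAIM =====
def Claim_equal_assign_regions : Prop := ∀ (s_curve_teams : List (List (String × Int))), Dom_assign_regions s_curve_teams → Pre_assign_regions s_curve_teams → Spec_assign_regions s_curve_teams (assign_regions s_curve_teams)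

-- ===== LEMMAS AND PROOFS =====

-- B's grouping dict looked up at k is exactly A's per-seed-line filter of the input.
lemma groups_getD (ts : List (List (String × Int))) (k : Int) :
    (ts.foldl (fun d t => d.modify (pvSeed t) [] (· ++ [t])) PySem.Dict.empty).getD k []
      = ts.filter (fun t => pvSeed t == k) := by
  have h := PySem.Dict.getD_foldl_modify_append
      (l := ts.map (fun t => (pvSeed t, t))) (d := PySem.Dict.empty) (c := k)
  rw [List.foldl_map, List.filter_map, List.map_map] at h
  simpa [Function.comp_def] using h

-- Python %: i % 4 = i for 0 ≤ i < 4
lemma pvMod4_eq (i : Int) (h0 : 0 ≤ i) (h4 : i < 4) : PySem.Int.mod i 4 = i := by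
  simp only [PySem.Int.mod, Int.fmod_eq_emod]
  omega

-- ===== VERDICT =====
theorem assign_regions_spec : Claim_equal_assign_regions := by
  intro ts _ hpre
  obtain ⟨hkeys, hlen⟩ := hpre
  unfold Spec_assign_regions assign_regions assign_regions_alt
  dsimp only
  have hR0 : (["East", "West", "South", "Midwest"].foldl
      (fun (d : PySem.Dict String (List (List (String × Int)))) n => d.insert n []) PySem.Dict.empty)
      = PySem.Dict.ofList [("East", []), ("West", []), ("South", []), ("Midwest", [])] := by decide
  have hnm : (PySem.Dict.ofList
      ([("East", []), ("West", []), ("South", []), ("Midwest", [])] :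
        List (String × List (List (String × Int))))).keys
      = ["East", "West", "South", "Midwest"] := by decide
  rw [hR0, hnm]
  congr 1
  apply PySem.List.foldl_congr_mem
  intro acc sl hsl
  rw [groups_getD]
  by_cases h1 : sl = 1
  · subst h1
    simp only [beq_self_eq_true, if_true]
    apply PySem.List.foldl_congr_mem
    intro acc2 p hp
    rw [PySem.List.mem_enumerate_iff] at hp
    obtain ⟨k, hk, rfl⟩ := hp
    rw [pvMod4_eq] <;> omega
  · simp only [show (sl == 1) = false from beq_eq_false_iff_ne.mpr h1, Bool.false_eq_true, if_false]
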